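-- pv_equiv track=rewrite | github.com/Ag3497120/verantyx-cortex | src/verantyx/cross_engine/planner.py | reconstruct_first_action
-- ===== SOURCE A (Python) =====
-- def reconstruct_first_action(came_from, current, start) -> int:
--     """
--     目標座標から逆順に辿り、スタート直後の最初のアクションを返す
--     """
--     last_action = -1
--     while current in came_from:
--         prev, action = came_from[current]
--         if prev == start:
--             return action
--         current = prev
--         last_action = action
--     return last_action
-- ===== SOURCE B (Python) =====
-- def reconstruct_first_action(came_from, current, start) -> int:
--     # Phase 1: materialise the whole parent chain (cycle-safe via a seen set),
--     # Phase 2: scan it for the edge out of start; fall back to the last edge, or -1.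
--     path = []
--     seen = set()
--     node = current
--     while node in came_from and node not in seen:
--         seen.add(node)
--         prev, action = came_from[node]
--         path.append((prev, action))
--         node = prev
--     for prev, action in path:
--         if prev == start:
--             return action
--     return path[-1][1] if path else -1
-- ===== Notes on version B (the rewrite author's own statement) =====
-- stated objective: alternative
-- what changed: A does one early-returning walk keeping only a last_action accumulator; B first materialises the whole parent chain into an explicit path list (made cycle-safe by a visited set instead of relying on early exit), then separately scans that list for the edge out of start, falling back to the last collected edge or -1.
import Mathlib
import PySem

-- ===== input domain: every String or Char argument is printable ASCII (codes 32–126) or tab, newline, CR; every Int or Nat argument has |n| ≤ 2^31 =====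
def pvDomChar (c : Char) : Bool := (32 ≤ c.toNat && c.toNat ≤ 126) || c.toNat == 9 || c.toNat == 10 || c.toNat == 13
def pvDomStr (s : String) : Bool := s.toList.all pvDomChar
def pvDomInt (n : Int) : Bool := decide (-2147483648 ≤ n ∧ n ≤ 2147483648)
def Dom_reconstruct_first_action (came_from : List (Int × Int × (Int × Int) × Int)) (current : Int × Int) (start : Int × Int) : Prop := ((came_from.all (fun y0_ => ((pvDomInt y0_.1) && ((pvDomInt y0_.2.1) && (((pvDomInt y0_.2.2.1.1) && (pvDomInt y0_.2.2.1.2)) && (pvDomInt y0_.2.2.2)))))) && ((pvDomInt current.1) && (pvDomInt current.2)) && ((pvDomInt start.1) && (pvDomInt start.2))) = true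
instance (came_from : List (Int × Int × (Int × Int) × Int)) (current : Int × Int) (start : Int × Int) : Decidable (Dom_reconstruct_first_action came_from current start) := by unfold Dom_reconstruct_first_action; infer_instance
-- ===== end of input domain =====

-- B materialises the whole parent chain (made cycle-safe by a seen set) and then scans it,
-- instead of A's single early-returning walk with a last-action accumulator; objective: alternative decomposition.

-- ===== PORT A =====
-- dict lookup came_from[c] / 'c in came_from' (first match in the association list)
def pvLookup (d : List (Int × Int × (Int × Int) × Int)) (c : Int × Int) : Option ((Int × Int) × Int) :=
  (d.find? (fun e => (e.1, e.2.1) == c)).map (fun e => e.2.2)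

-- the while loop of A; fuel d.length+1 suffices on every input where the Python loop terminates
-- (the visited nodes are then pairwise distinct keys of the dict)
def pvALoop (d : List (Int × Int × (Int × Int) × Int)) (start : Int × Int) : Nat → (Int × Int) → Int → Int
  | 0, _, last => last
  | fuel+1, cur, last =>
    match pvLookup d cur with
    | none => last
    | some (prev, action) => if prev == start then action else pvALoop d start fuel prev action

def reconstruct_first_action (came_from : List (Int × Int × (Int × Int) × Int)) (current : Int × Int) (start : Int × Int) : Int :=
  pvALoop came_from start (came_from.length + 1) current (-1)

-- ===== PORT B =====
-- phase 1 of B: 'while node in came_from and node not in seen: …' collecting (prev, action) pairs;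
-- each iteration adds a fresh key of the dict to seen, so fuel d.length+1 is never exhausted
def pvBWalk (d : List (Int × Int × (Int × Int) × Int)) : Nat → (Int × Int) → PySem.Set (Int × Int) → List ((Int × Int) × Int)
  | 0, _, _ => []
  | fuel+1, node, seen =>
    match pvLookup d node with
    | none => []
    | some (prev, action) =>
      if PySem.Set.contains seen node then []
      else (prev, action) :: pvBWalk d fuel prev (PySem.Set.add seen node)

def reconstruct_first_action_alt (came_from : List (Int × Int × (Int × Int) × Int)) (current : Int × Int) (start : Int × Int) : Int :=
  let path := pvBWalk came_from (came_from.length + 1) current PySem.Set.empty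
  -- phase 2 of B: 'for prev, action in path: if prev == start: return action'
  match path.find? (fun pa => pa.1 == start) with
  | some pa => pa.2
  | none =>
    -- 'return path[-1][1] if path else -1'
    match path.getLast? with
    | some pa => pa.2
    | none => -1

-- ===== PRECONDITION & SPEC =====
-- the successor map of the chain: node ↦ its recorded predecessor (identity off the dict)
def pvStep (d : List (Int × Int × (Int × Int) × Int)) (c : Int × Int) : Int × Int :=
  match pvLookup d c with | none => c | some (prev, _) => prev
-- a node on which A's loop stops: absent from the dict, or its predecessor is start
def pvTerm (d : List (Int × Int × (Int × Int) × Int)) (start : Int × Int) (c : Int × Int) : Bool :=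
  match pvLookup d c with | none => true | some (prev, _) => prev == start
-- Pre_ = exactly the inputs on which A's while loop terminates (otherwise the Python loops forever):
-- some node within d.length steps of current along the predecessor map is a stopping node.
def Pre_reconstruct_first_action (came_from : List (Int × Int × (Int × Int) × Int)) (current : Int × Int) (start : Int × Int) : Prop :=
  ∃ i ∈ List.range (came_from.length + 1), pvTerm came_from start ((pvStep came_from)^[i] current) = true
instance (came_from : List (Int × Int × (Int × Int) × Int)) (current : Int × Int) (start : Int × Int) : Decidable (Pre_reconstruct_first_action came_from current start) := by unfold Pre_reconstruct_first_action; infer_instance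

def pvWitness_reconstruct_first_action : (List (Int × Int × (Int × Int) × Int)) × (Int × Int) × (Int × Int) :=
  ([(0, 0, (1, 1), 7)], (0, 0), (1, 1))

def Spec_reconstruct_first_action (came_from : List (Int × Int × (Int × Int) × Int)) (current : Int × Int) (start : Int × Int) (out : Int) : Prop := out = reconstruct_first_action_alt came_from current start
instance (came_from : List (Int × Int × (Int × Int) × Int)) (current : Int × Int) (start : Int × Int) (out : Int) : Decidable (Spec_reconstruct_first_action came_from current start out) := by unfold Spec_reconstruct_first_action; infer_instance

-- ===== CLAIM (what is proved, stated in full; the proofs are below) =====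
def Claim_equal_reconstruct_first_action : Prop := ∀ (came_from : List (Int × Int × (Int × Int) × Int)) (current : Int × Int) (start : Int × Int), Dom_reconstruct_first_action came_from current start → Pre_reconstruct_first_action came_from current start → Spec_reconstruct_first_action came_from current start (reconstruct_first_action came_from current start)

-- ===== LEMMAS AND PROOFS =====

-- B's phase 2 as a function of the collected path and A's accumulator
def pvF (start : Int × Int) (path : List ((Int × Int) × Int)) (last : Int) : Int :=
  match path.find? (fun pa => pa.1 == start) with
  | some pa => pa.2
  | none =>
    match path.getLast? with
    | some pa => pa.2
    | none => last

lemma pvF_cons (start p : Int × Int) (a : Int) (tail : List ((Int × Int) × Int)) (last : Int)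
    (h : (p == start) = false) :
    pvF start ((p, a) :: tail) last = pvF start tail a := by
  unfold pvF
  simp only [List.find?_cons, h]
  cases hf : tail.find? (fun pa => pa.1 == start) with
  | some pa => simp
  | none =>
    cases tail with
    | nil => simp
    | cons x xs =>
      rw [List.getLast?_cons_cons]
      cases hg : (x :: xs).getLast? with
      | none => simp at hg
      | some pa => rfl

-- before the first stopping node the trajectory is injective
lemma pv_inj_before_term {α : Type} (f : α → α) (P : α → Bool) (c : α) (t : Nat)
    (hterm : P (f^[t] c) = true) (hmin : ∀ i < t, P (f^[i] c) = false) :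
    ∀ i j, i < j → j ≤ t → f^[i] c ≠ f^[j] c := by
  intro i j hij hjt heq
  have hper : ∀ k, f^[i + k] c = f^[i + k % (j - i)] c := by
    intro k
    induction k using Nat.strong_induction_on with
    | _ k ih =>
      by_cases hk : k < j - i
      · rw [Nat.mod_eq_of_lt hk]
      · have hji : 0 < j - i := by omega
        have hk' : j - i ≤ k := by omega
        have h1 : i + k = (k - (j - i)) + j := by omega
        have h2 : f^[i + k] c = f^[k - (j - i)] (f^[j] c) := by
          rw [h1, Function.iterate_add_apply]
        rw [← heq] at h2
        rw [← Function.iterate_add_apply] at h2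
        have h3 : k - (j - i) + i = i + (k - (j - i)) := by omega
        rw [h3] at h2
        rw [h2, ih (k - (j - i)) (by omega)]
        rw [Nat.mod_eq_sub_mod hk']
  have hti : i ≤ t := by omega
  have := hper (t - i)
  have hlt : (t - i) % (j - i) < j - i := Nat.mod_lt _ (by omega)
  have ht' : i + (t - i) % (j - i) < t ∨ i + (t - i) % (j - i) = t := by omega
  rcases ht' with h | h
  · have hP := hmin _ h
    rw [← this] at hP
    have : i + (t - i) = t := by omega
    rw [this] at hP
    rw [hterm] at hP
    exact absurd hP (by simp)
  · -- then t < j ≤ t, impossible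
    omega

-- main invariant: A's remaining loop equals B's phase 2 applied to the remaining collected path
lemma pv_main (d : List (Int × Int × (Int × Int) × Int)) (start : Int × Int) :
    ∀ t fuel cur (seen : PySem.Set (Int × Int)) last,
    t < fuel →
    pvTerm d start ((pvStep d)^[t] cur) = true →
    (∀ i < t, pvTerm d start ((pvStep d)^[i] cur) = false) →
    (∀ i ≤ t, ((pvStep d)^[i] cur) ∉ seen) →
    (∀ i j, i < j → j ≤ t → (pvStep d)^[i] cur ≠ (pvStep d)^[j] cur) →
    pvALoop d start fuel cur last = pvF start (pvBWalk d fuel cur seen) last := by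
  intro t
  induction t with
  | zero =>
    intro fuel cur seen last hfuel hterm _ hfresh _
    obtain ⟨f, rfl⟩ : ∃ f, fuel = f + 1 := ⟨fuel - 1, by omega⟩
    simp only [Function.iterate_zero, id] at hterm
    have hcur : cur ∉ seen := by
      have := hfresh 0 (le_refl 0); simpa using this
    cases hl : pvLookup d cur with
    | none => simp [pvALoop, pvBWalk, hl, pvF]
    | some pa =>
      obtain ⟨prev, action⟩ := pa
      have hps : (prev == start) = true := by
        unfold pvTerm at hterm; rw [hl] at hterm; exact hterm
      simp [pvALoop, pvBWalk, hl, hcur, pvF, hps]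
  | succ t ih =>
    intro fuel cur seen last hfuel hterm hmin hfresh hinj
    obtain ⟨f, rfl⟩ : ∃ f, fuel = f + 1 := ⟨fuel - 1, by omega⟩
    have h0 : pvTerm d start cur = false := by
      have := hmin 0 (by omega); simpa using this
    cases hl : pvLookup d cur with
    | none => unfold pvTerm at h0; rw [hl] at h0; simp at h0
    | some pa =>
      obtain ⟨prev, action⟩ := pa
      have hps : (prev == start) = false := by
        unfold pvTerm at h0; rw [hl] at h0; exact h0
      have hcur : cur ∉ seen := by
        have := hfresh 0 (by omega); simpa using this
      have hstep : pvStep d cur = prev := by unfold pvStep; rw [hl]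
      have hshift : ∀ i, (pvStep d)^[i] prev = (pvStep d)^[i + 1] cur := by
        intro i
        rw [Function.iterate_add_apply, Function.iterate_one, hstep]
      have goalA : pvALoop d start (f + 1) cur last = pvALoop d start f prev action := by
        simp [pvALoop, hl, hps]
      have goalB : pvBWalk d (f + 1) cur seen
          = (prev, action) :: pvBWalk d f prev (PySem.Set.add seen cur) := by
        simp [pvBWalk, hl, hcur]
      rw [goalA, goalB, pvF_cons _ _ _ _ _ hps]
      apply ih f prev (PySem.Set.add seen cur) action
      · omega
      · rw [hshift]; exact hterm
      · intro i hi; rw [hshift]; exact hmin (i + 1) (by omega)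
      · intro i hi
        have h₁ : ((pvStep d)^[i + 1] cur) ∉ seen := hfresh (i + 1) (by omega)
        have h₂ : (pvStep d)^[i + 1] cur ≠ cur := by
          intro h
          exact hinj 0 (i + 1) (by omega) (by omega) (by simpa using h.symm)
        have hadd : PySem.Set.add seen cur = seen ++ [cur] := by
          simp [PySem.Set.add, hcur]
        rw [hshift, hadd]
        intro hmem
        rcases List.mem_append.mp hmem with hm | hm
        · exact h₁ hm
        · exact h₂ (by simpa using hm)
      · intro i j hij hjt
        rw [hshift, hshift]
        exact hinj (i + 1) (j + 1) (by omega) (by omega)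

-- ===== VERDICT (by name: the statement is the Claim_ definition above) =====
theorem reconstruct_first_action_spec : Claim_equal_reconstruct_first_action := by
  intro came_from current start _ hpre
  unfold Spec_reconstruct_first_action
  obtain ⟨w, hw, hwt⟩ := hpre
  rw [List.mem_range] at hw
  have hex : ∃ i, pvTerm came_from start ((pvStep came_from)^[i] current) = true := ⟨w, hwt⟩
  set t := Nat.find hex with ht
  have hterm := Nat.find_spec hex
  have hmin : ∀ i < t, pvTerm came_from start ((pvStep came_from)^[i] current) = false := by
    intro i hi
    have := Nat.find_min hex hi
    simpa using this
  have htle : t ≤ w := Nat.find_min' hex hwt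
  have hinj := pv_inj_before_term (pvStep came_from)
    (pvTerm came_from start) current t hterm hmin
  unfold reconstruct_first_action reconstruct_first_action_alt
  rw [pv_main came_from start t (came_from.length + 1) current PySem.Set.empty (-1)
      (by omega) hterm hmin (fun i _ => by simp [PySem.Set.empty]) hinj]
  rfl
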